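-- pv_equiv track=rewrite | github.com/UnknownEquineCoderFH/PGI | main.py | break_sequence
-- ===== SOURCE A (Python) =====
-- from typing import Iterator, Never, Protocol, Sequence, TypeGuard, Callable, Self
--
-- def break_sequence(inp: str) -> Iterator[str]:
--     skips = 0
--
--     for idx, char in enumerate(inp):
--         if skips:
--             skips -= 1
--             continue
--
--         if char == "<":
--             closing_tag = inp.find(">", idx)
--
--             if closing_tag == -1:
--                 raise ValueError("Unclosed tag")
--
--             skips += closing_tag - idx
--
--             yield inp[idx : closing_tag + 1]
--         else:
--             yield char
-- ===== SOURCE B (Python) =====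
-- def break_sequence(inp):
--     pieces = inp.split(">")
--     last = pieces.pop()
--     for piece in pieces:
--         i = piece.find("<")
--         if i == -1:
--             yield from piece
--             yield ">"
--         else:
--             yield from piece[:i]
--             yield piece[i:] + ">"
--     if "<" in last:
--         raise ValueError("Unclosed tag")
--     yield from last
-- ===== Notes on version B (the rewrite author's own statement) =====
-- stated objective: alternative
-- what changed: Replaced the single character scan with a skips down-counter by a staged pass: split the input on '>', classify each piece by its first '<' (chars before it are singletons, the remainder plus the '>' is a tag), and require the last piece to be tag-free.
import Mathlib
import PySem

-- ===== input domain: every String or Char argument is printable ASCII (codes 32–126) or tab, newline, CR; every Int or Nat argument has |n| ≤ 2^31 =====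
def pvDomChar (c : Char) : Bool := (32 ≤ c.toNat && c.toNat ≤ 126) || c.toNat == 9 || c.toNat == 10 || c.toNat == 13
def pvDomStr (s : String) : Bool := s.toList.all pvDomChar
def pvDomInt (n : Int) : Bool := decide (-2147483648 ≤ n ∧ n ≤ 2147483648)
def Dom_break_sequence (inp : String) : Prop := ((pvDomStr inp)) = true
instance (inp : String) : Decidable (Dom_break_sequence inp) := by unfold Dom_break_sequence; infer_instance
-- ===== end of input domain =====

-- B replaces A's enumerate loop with a skips down-counter by a staged algorithm: split
-- the input on '>', classify each piece by its first '<', require the last piece tag-free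
-- (objective: alternative).


-- ===== PORT A =====
-- for idx, char in enumerate(inp), with the 'skips' down-counter; 'rest' is the
-- suffix of the enumeration still to visit.  The 'closing = -1' branch is where
-- the Python raises ValueError("Unclosed tag"); it is excluded by Pre_ below.
def breakLoopA (s : List Char) (idx : Nat) (rest : List Char) (skips : Int)
    (acc : List String) : List String :=
  match rest with
  | [] => acc
  | c :: t =>
    if skips ≠ 0 then breakLoopA s (idx + 1) t (skips - 1) acc
    else if c = '<' then
      let closing := PySem.Chars.findFrom s ['>'] (idx : Int)
      if closing = -1 then acc   -- raise ValueError: outside Pre_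
      else breakLoopA s (idx + 1) t (skips + (closing - (idx : Int)))
        (acc ++ [String.ofList (PySem.Chars.slice s (some (idx : Int)) (some (closing + 1)))])
    else breakLoopA s (idx + 1) t skips (acc ++ [String.ofList [c]])

def break_sequence (inp : String) : List String :=
  breakLoopA inp.toList 0 inp.toList 0 []

-- ===== PORT B =====
-- inp.split(">") ported by hand for the 1-character separator: exact (each piece is the
-- run before a '>', the final piece the remainder)
def splitGt (l : List Char) : List (List Char) :=
  match h : l.dropWhile (· ≠ '>') with
  | [] => [l.takeWhile (· ≠ '>')]
  | _ :: rest => l.takeWhile (· ≠ '>') :: splitGt rest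
termination_by l.length
decreasing_by
  have h1 : (l.dropWhile (· ≠ '>')).length ≤ l.length := List.length_dropWhile_le _ _
  rw [h] at h1; simp at h1 ⊢; omega

-- one piece of the loop body: piece.find("<") ported as takeWhile/dropWhile at the
-- first '<' (exact); 'yield from piece[:i]; yield piece[i:] + ">"' vs the no-'<' branch
def pieceOut (piece : List Char) : List String :=
  match piece.dropWhile (· ≠ '<') with
  | [] => piece.map (fun c => String.ofList [c]) ++ [String.ofList ['>']]
  | d :: tagRest => (piece.takeWhile (· ≠ '<')).map (fun c => String.ofList [c])
      ++ [String.ofList ((d :: tagRest) ++ ['>'])]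

-- 'last = pieces.pop(); for piece in pieces: …' then the tag-free check on last;
-- the '"<" in last' branch is the ValueError ("Unclosed tag"), excluded by Pre_ below
def piecesOut : List (List Char) → List String
  | [] => []          -- unreachable: split always yields at least one piece
  | [last] => if '<' ∈ last then [] else last.map (fun c => String.ofList [c])
  | piece :: rest => pieceOut piece ++ piecesOut rest

def break_sequence_alt (inp : String) : List String :=
  piecesOut (splitGt inp.toList)

-- ===== PRECONDITION & SPEC =====
-- helper: every '<' in the character list has a '>' strictly after it
def NoUnclosed (s : List Char) : Prop :=
  ∀ i < s.length, s.getD i ' ' = '<' → ∃ j < s.length, i < j ∧ s.getD j ' ' = '>'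

-- Pre_ excludes exactly the inputs with an unclosed '<', on which both Pythons raise ValueError.
def Pre_break_sequence (inp : String) : Prop := NoUnclosed inp.toList
instance (inp : String) : Decidable (Pre_break_sequence inp) := by
  unfold Pre_break_sequence NoUnclosed; infer_instance

def pvWitness_break_sequence : String := "x<a>y"

def Spec_break_sequence (inp : String) (out : List String) : Prop := out = break_sequence_alt inp
instance (inp : String) (out : List String) : Decidable (Spec_break_sequence inp out) := by
  unfold Spec_break_sequence; infer_instance

-- ===== CLAIM (what is proved, stated in full; the proofs are below) =====
def Claim_equal_break_sequence : Prop :=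
  ∀ (inp : String), Dom_break_sequence inp → Pre_break_sequence inp →
    Spec_break_sequence inp (break_sequence inp)

-- ===== LEMMAS AND PROOFS =====

-- proof-only middle form: the structural recursion both ports are compared against
def breakRecB : List Char → List String
  | [] => []
  | c :: rest =>
    if c = '<' then
      match h : rest.dropWhile (· ≠ '>') with
      | [] => []
      | _ :: after =>
        String.ofList ('<' :: rest.takeWhile (· ≠ '>') ++ ['>']) :: breakRecB after
    else String.ofList [c] :: breakRecB rest
termination_by l => l.length
decreasing_by
  · have h1 : (rest.dropWhile (· ≠ '>')).length ≤ rest.length :=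
      List.length_dropWhile_le _ _
    rw [h] at h1; simp at h1 ⊢; omega
  · simp

-- burning a nonnegative 'skips' counter just advances the enumeration
lemma breakLoopA_skip (s : List Char) :
    ∀ (k idx : Nat) (acc : List String), idx + k ≤ s.length →
      breakLoopA s idx (s.drop idx) (k : Int) acc
        = breakLoopA s (idx + k) (s.drop (idx + k)) 0 acc := by
  intro k
  induction k with
  | zero => intro idx acc _; simp
  | succ k ih =>
    intro idx acc hle
    have hlt : idx < s.length := by omega
    rw [List.drop_eq_getElem_cons hlt]
    show breakLoopA s idx (s[idx] :: s.drop (idx + 1)) ((k + 1 : Nat) : Int) acc = _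
    rw [breakLoopA, if_pos (by exact_mod_cast Nat.succ_ne_zero k)]
    have : ((k + 1 : Nat) : Int) - 1 = (k : Int) := by push_cast; ring
    rw [this, ih (idx + 1) acc (by omega),
      show idx + 1 + k = idx + (k + 1) from by omega]

lemma breakLoop_agree (s : List Char) (hpre : NoUnclosed s) :
    ∀ (fuel idx : Nat), s.length - idx ≤ fuel → idx ≤ s.length →
      ∀ acc, breakLoopA s idx (s.drop idx) 0 acc = acc ++ breakRecB (s.drop idx) := by
  intro fuel
  induction fuel with
  | zero =>
    intro idx hf hle acc
    have : idx = s.length := by omega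
    subst this
    rw [List.drop_length]
    simp [breakLoopA, breakRecB]
  | succ fuel ih =>
    intro idx hf hle acc
    rcases Nat.lt_or_ge idx s.length with hlt | hge
    · rw [List.drop_eq_getElem_cons hlt, breakLoopA, if_neg (by simp)]
      by_cases hc : s[idx] = '<'
      · rw [if_pos hc]
        set rest := s.drop (idx + 1) with hrest
        set body := rest.takeWhile (· ≠ '>') with hbody
        set L := body.length with hL
        obtain ⟨j, hj, hij, hjgt⟩ := hpre idx hlt (by simp [List.getD_eq_getElem?_getD, hlt, hc])
        have hjget : s[j] = '>' := by
          have : s.getD j ' ' = s[j] := by simp [List.getD_eq_getElem?_getD, hj]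
          rw [this] at hjgt; exact hjgt
        have hmem : '>' ∈ rest := by
          have h1 : j - (idx + 1) < rest.length := by rw [hrest]; simp; omega
          have h2 : rest[j - (idx + 1)]'h1 = s[j] := by
            simp only [hrest, List.getElem_drop]
            exact getElem_congr_idx (by omega)
          have h3 := List.getElem_mem h1
          rw [h2, hjget] at h3
          exact h3
        have hdropne : rest.dropWhile (· ≠ '>') ≠ [] := by
          intro hnil
          have hmem' : '>' ∈ rest.takeWhile (· ≠ '>') := by
            rw [← List.takeWhile_append_dropWhile (p := (· ≠ '>')) (l := rest), hnil] at hmem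
            simpa using hmem
          have := List.mem_takeWhile_imp hmem'
          simp at this
        obtain ⟨g, after, hgd⟩ := List.exists_cons_of_ne_nil hdropne
        have hghead : g = '>' := by
          have hh := List.head_dropWhile_not (fun x => decide (x ≠ '>')) (l := rest) hdropne
          have h1 : (rest.dropWhile (· ≠ '>')).head? = some g := by rw [hgd]; rfl
          have h2 := List.head?_eq_some_head (l := rest.dropWhile (· ≠ '>')) hdropne
          rw [h1] at h2
          have h3 : g = (rest.dropWhile (fun x => decide (x ≠ '>'))).head hdropne :=
            Option.some.inj h2
          rw [← h3] at hh
          simpa using hh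
        subst hghead
        have hsplit : rest = body ++ '>' :: after := by
          rw [hbody, ← hgd, List.takeWhile_append_dropWhile]
        have hlen : s.length = idx + 1 + L + 1 + after.length := by
          have : rest.length = s.length - (idx + 1) := by rw [hrest]; simp
          rw [hsplit] at this; simp at this; omega
        have hbody_ne : ∀ i (hi : i < L), body[i]'(by omega) ≠ '>' := by
          intro i hi
          have hm : body[i]'(by omega) ∈ rest.takeWhile (· ≠ '>') := by
            rw [← hbody]; exact List.getElem_mem _
          have := List.mem_takeWhile_imp hm
          simpa using this
        have hgetrest : ∀ i (hi : idx + 1 + i < s.length), s[idx + 1 + i] = rest[i]'(by rw [hrest]; simp; omega) := by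
          intro i hi
          simp only [hrest, List.getElem_drop]
        have hfind_ne : PySem.Chars.findFrom s ['>'] (idx : Int) ≠ -1 := by
          intro hno
          rw [PySem.Chars.findFrom_natCast_eq_neg_one_iff s ['>'] idx (by omega)] at hno
          apply hno
          have : '>' ∈ s.drop idx := by
            have h1 : j - idx < (s.drop idx).length := by simp; omega
            have h2 : (s.drop idx)[j - idx]'h1 = s[j] := by
              simp only [List.getElem_drop]
              exact getElem_congr_idx (by omega)
            have h3 := List.getElem_mem h1
            rw [h2, hjget] at h3
            exact h3
          obtain ⟨l1, l2, hx⟩ := List.append_of_mem this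
          exact ⟨l1, l2, by simp [hx]⟩
        rw [if_neg hfind_ne]
        set closing := PySem.Chars.findFrom s ['>'] (idx : Int) with hcl
        obtain ⟨hge', hpref, hmin⟩ := PySem.Chars.findFrom_natCast_spec s ['>'] idx (by omega) hfind_ne
        have hclnn : 0 ≤ closing := le_trans (by exact_mod_cast Nat.zero_le idx) hge'
        have hpref_iff : ∀ p (hp : p < s.length), (['>'] <+: s.drop p ↔ s[p]'hp = '>') := by
          intro p hp
          rw [List.drop_eq_getElem_cons hp, List.cons_prefix_cons]
          simp [eq_comm]
        have hclts : closing.toNat < s.length := by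
          by_contra hcon
          rw [List.drop_eq_nil_of_le (by omega)] at hpref
          simp at hpref
        have hclget : s[closing.toNat]'hclts = '>' := (hpref_iff closing.toNat hclts).mp hpref
        have hcleq : closing.toNat = idx + 1 + L := by
          by_contra hne
          rcases Nat.lt_or_ge closing.toNat (idx + 1 + L) with h1 | h1
          · rcases Nat.eq_or_lt_of_le (show idx ≤ closing.toNat by omega) with he | hlt2
            · have hx : s[idx]'hlt = s[closing.toNat]'hclts := getElem_congr_idx he
              rw [hx, hclget] at hc; simp at hc
            · have hi : closing.toNat - (idx + 1) < L := by omega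
              have := hbody_ne _ hi
              apply this
              have hklen : closing.toNat - (idx+1) < rest.length := by
                rw [hsplit]; simp; omega
              have hb : body[closing.toNat - (idx+1)]'(by omega) = rest[closing.toNat - (idx+1)]'hklen := by
                have e1 : rest[closing.toNat - (idx+1)]'hklen
                    = (body ++ '>' :: after)[closing.toNat - (idx+1)]'(by simp; omega) :=
                  getElem_congr_coll hsplit
                rw [e1, List.getElem_append_left (by omega)]
              rw [hb, ← hgetrest _ (by omega)]
              rw [show s[idx + 1 + (closing.toNat - (idx + 1))]'(by omega) = s[closing.toNat]'hclts from getElem_congr_idx (by omega)]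
              exact hclget
          · have := hmin (idx + 1 + L) (by omega) (by omega)
            apply this
            apply (hpref_iff _ (by omega)).mpr
            rw [hgetrest L (by omega)]
            have e1 : rest[L]'(by rw [hsplit]; simp; omega) = (body ++ '>' :: after)[L]'(by simp; omega) :=
              getElem_congr_coll hsplit
            rw [e1, List.getElem_append_right (by omega)]
            rw [getElem_congr_idx (show L - body.length = 0 from by omega)]
            rfl
        have hslice : PySem.Chars.slice s (some (idx : Int)) (some (closing + 1))
            = '<' :: body ++ ['>'] := by
          have h1 : closing + 1 = ((idx + 1 + L + 1 : Nat) : Int) := by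
            have : closing = ((closing.toNat : Nat) : Int) := by omega
            rw [this, hcleq]; push_cast; ring
          rw [h1, PySem.Chars.slice_eq_listSlice, PySem.List.slice_natCast]
          rw [List.drop_eq_getElem_cons hlt, hc, ← hrest, hsplit]
          rw [show idx + 1 + L + 1 - idx = L + 2 from by omega]
          have hre : (('<' : Char) :: (body ++ '>' :: after)) = ('<' :: body ++ ['>']) ++ after := by
            simp
          rw [hre, List.take_append_of_le_length (by simp; omega),
            List.take_of_length_le (by simp; omega)]
        rw [hslice]
        have hskipcast : (0 : Int) + (closing - (idx : Int)) = ((closing.toNat - idx : Nat) : Int) := by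
          omega
        rw [hskipcast, breakLoopA_skip s (closing.toNat - idx) (idx + 1) _ (by omega)]
        rw [show idx + 1 + (closing.toNat - idx) = closing.toNat + 1 from by omega]
        rw [ih (closing.toNat + 1) (by omega) (by omega)]
        have hafter : s.drop (closing.toNat + 1) = after := by
          rw [hcleq, show idx + 1 + L + 1 = (idx + 1) + (L + 1) from by omega,
            ← List.drop_drop, ← hrest, hsplit]
          simp [hL]
        rw [hafter]
        rw [hc]
        rw [breakRecB]
        rw [if_pos rfl]
        have : (match h : rest.dropWhile (· ≠ '>') with
          | [] => ([] : List String)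
          | _ :: after => String.ofList ('<' :: rest.takeWhile (· ≠ '>') ++ ['>']) :: breakRecB after)
            = String.ofList ('<' :: body ++ ['>']) :: breakRecB after := by
          split
          · rename_i heq; rw [heq] at hgd; exact absurd hgd (by simp)
          · rename_i g' after' heq
            rw [heq] at hgd
            obtain ⟨-, hA⟩ := List.cons.inj hgd
            rw [hA, hbody]
        rw [this]
        simp
      · rw [if_neg hc]
        rw [ih (idx + 1) (by omega) (by omega)]
        rw [breakRecB, if_neg hc]
        simp
    · have : idx = s.length := by omega
      subst this
      rw [List.drop_length]
      simp [breakLoopA, breakRecB]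

-- ===== B-side bridge: piecesOut ∘ splitGt = breakRecB under Pre_ =====

lemma splitGt_nil_eq (l : List Char) (h : l.dropWhile (· ≠ '>') = []) :
    splitGt l = [l.takeWhile (· ≠ '>')] := by
  rw [splitGt]
  split
  · rfl
  · rename_i g rest heq; rw [heq] at h; exact absurd h (by simp)

lemma splitGt_cons_eq (l : List Char) (g : Char) (rest : List Char)
    (h : l.dropWhile (· ≠ '>') = g :: rest) :
    splitGt l = l.takeWhile (· ≠ '>') :: splitGt rest := by
  rw [splitGt]
  split
  · rename_i heq; rw [heq] at h; exact absurd h (by simp)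
  · rename_i g' rest' heq
    rw [heq] at h
    obtain ⟨-, hr⟩ := List.cons.inj h
    rw [hr]

lemma splitGt_ne_nil (l : List Char) : splitGt l ≠ [] := by
  rw [splitGt]
  split <;> simp

lemma noUnclosed_getElem {l : List Char} (h : NoUnclosed l) :
    ∀ i (hi : i < l.length), l[i] = '<' →
      ∃ j, ∃ hj : j < l.length, i < j ∧ l[j] = '>' := by
  intro i hi hlt
  obtain ⟨j, hj, hij, hgt⟩ := h i hi (by simp [List.getD_eq_getElem?_getD, hi, hlt])
  exact ⟨j, hj, hij, by simpa [List.getD_eq_getElem?_getD, hj] using hgt⟩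

lemma noUnclosed_of_getElem {l : List Char}
    (h : ∀ i (hi : i < l.length), l[i] = '<' →
      ∃ j, ∃ hj : j < l.length, i < j ∧ l[j] = '>') : NoUnclosed l := by
  intro i hi hlt
  obtain ⟨j, hj, hij, hgt⟩ := h i hi (by simpa [List.getD_eq_getElem?_getD, hi] using hlt)
  exact ⟨j, hj, hij, by simp [List.getD_eq_getElem?_getD, hj, hgt]⟩

lemma noUnclosed_tail {c : Char} {t : List Char} (h : NoUnclosed (c :: t)) :
    NoUnclosed t := by
  apply noUnclosed_of_getElem
  intro i hi hlt
  obtain ⟨j, hj, hij, hgt⟩ := noUnclosed_getElem h (i + 1) (by simp; omega)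
    (by simpa using hlt)
  refine ⟨j - 1, by simp at hj; omega, by omega, ?_⟩
  have h2 : (c :: t)[j]'hj = t[j - 1]'(by simp at hj; omega) := by
    rw [getElem_congr_idx (show j = (j - 1) + 1 from by omega)]
    simp
  rw [h2] at hgt
  exact hgt

lemma noUnclosed_suffix {l₂ l : List Char} (hs : l₂ <:+ l) (h : NoUnclosed l) :
    NoUnclosed l₂ := by
  obtain ⟨pre, rfl⟩ := hs
  induction pre with
  | nil => exact h
  | cons c t ih => exact ih (noUnclosed_tail h)

lemma pieceOut_nofind (piece : List Char) (h : piece.dropWhile (· ≠ '<') = []) :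
    pieceOut piece = piece.map (fun c => String.ofList [c]) ++ [String.ofList ['>']] := by
  rw [pieceOut]
  split
  · rfl
  · rename_i d r heq; rw [heq] at h; exact absurd h (by simp)

lemma pieceOut_found (piece : List Char) (d : Char) (tagRest : List Char)
    (h : piece.dropWhile (· ≠ '<') = d :: tagRest) :
    pieceOut piece = (piece.takeWhile (· ≠ '<')).map (fun c => String.ofList [c])
      ++ [String.ofList ((d :: tagRest) ++ ['>'])] := by
  rw [pieceOut]
  split
  · rename_i heq; rw [heq] at h; exact absurd h (by simp)
  · rename_i d' r' heq
    rw [heq] at h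
    obtain ⟨h1, h2⟩ := List.cons.inj h
    rw [h1, h2]

lemma pieceOut_cons {c : Char} (p : List Char) (hc : c ≠ '<') :
    pieceOut (c :: p) = String.ofList [c] :: pieceOut p := by
  have hd : (c :: p).dropWhile (· ≠ '<') = p.dropWhile (· ≠ '<') := by
    rw [List.dropWhile_cons, if_pos (by simpa using hc)]
  have ht : (c :: p).takeWhile (· ≠ '<') = c :: p.takeWhile (· ≠ '<') := by
    rw [List.takeWhile_cons, if_pos (by simpa using hc)]
  match hdp : p.dropWhile (· ≠ '<') with
  | [] =>
    rw [pieceOut_nofind (c :: p) (by rw [hd, hdp]), pieceOut_nofind p hdp]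
    simp
  | d :: r =>
    rw [pieceOut_found (c :: p) d r (by rw [hd, hdp]), pieceOut_found p d r hdp, ht]
    simp

-- the key bridge: on inputs with no unclosed '<', B's staged pass equals breakRecB
lemma piecesOut_splitGt_eq (fuel : Nat) :
    ∀ l : List Char, l.length ≤ fuel → NoUnclosed l →
      piecesOut (splitGt l) = breakRecB l := by
  induction fuel with
  | zero =>
    intro l hf _
    have : l = [] := List.eq_nil_of_length_eq_zero (by omega)
    subst this
    rw [splitGt_nil_eq [] (by simp)]
    simp [piecesOut, breakRecB]
  | succ fuel ih =>
    intro l hf hpre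
    match l with
    | [] =>
      rw [splitGt_nil_eq [] (by simp)]
      simp [piecesOut, breakRecB]
    | c :: t =>
      by_cases hc : c = '<'
      · subst hc
        -- Pre_ gives a '>' in t
        obtain ⟨j, hj, hij, hgt⟩ := noUnclosed_getElem hpre 0 (by simp) (by simp)
        have hmem : '>' ∈ t := by
          have h1 : j - 1 < t.length := by simp at hj; omega
          have h2 : ('<' :: t)[j]'hj = t[j - 1]'h1 := by
            rw [getElem_congr_idx (show j = (j - 1) + 1 from by omega)]
            simp
          rw [h2] at hgt
          have := List.getElem_mem h1
          rw [hgt] at this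
          exact this
        have hdropne : t.dropWhile (· ≠ '>') ≠ [] := by
          intro hnil
          have hmem' : '>' ∈ t.takeWhile (· ≠ '>') := by
            rw [← List.takeWhile_append_dropWhile (p := (· ≠ '>')) (l := t), hnil] at hmem
            simpa using hmem
          have := List.mem_takeWhile_imp hmem'
          simp at this
        obtain ⟨g, after, hgd⟩ := List.exists_cons_of_ne_nil hdropne
        have hdl : ('<' :: t).dropWhile (· ≠ '>') = g :: after := by
          rw [List.dropWhile_cons, if_pos (by simp)]
          exact hgd
        have htw : ('<' :: t).takeWhile (· ≠ '>') = '<' :: t.takeWhile (· ≠ '>') := by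
          rw [List.takeWhile_cons, if_pos (by simp)]
        rw [splitGt_cons_eq _ g after hdl, htw]
        obtain ⟨q, qs, hq⟩ := List.exists_cons_of_ne_nil (splitGt_ne_nil after)
        rw [hq]
        rw [show piecesOut (('<' :: t.takeWhile (· ≠ '>')) :: q :: qs)
            = pieceOut ('<' :: t.takeWhile (· ≠ '>')) ++ piecesOut (q :: qs) from rfl]
        have hpiece : pieceOut ('<' :: t.takeWhile (· ≠ '>'))
            = [String.ofList ('<' :: t.takeWhile (· ≠ '>') ++ ['>'])] := by
          have hd : ('<' :: t.takeWhile (· ≠ '>')).dropWhile (· ≠ '<')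
              = '<' :: t.takeWhile (· ≠ '>') := by
            rw [List.dropWhile_cons, if_neg (by simp)]
          have ht : ('<' :: t.takeWhile (· ≠ '>')).takeWhile (· ≠ '<') = [] := by
            rw [List.takeWhile_cons, if_neg (by simp)]
          rw [pieceOut_found _ '<' (t.takeWhile (· ≠ '>')) hd, ht]
          simp
        rw [hpiece, ← hq]
        -- IH at 'after'
        have hsuf : after <:+ ('<' :: t) := by
          have h1 : g :: after <:+ t := hgd ▸ List.dropWhile_suffix _
          have h2 : after <:+ g :: after := ⟨[g], rfl⟩
          exact (h2.trans h1).trans ⟨['<'], rfl⟩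
        have hlen : after.length ≤ fuel := by
          have h1 := hsuf.length_le
          simp at h1 hf
          have h2 : (t.dropWhile (· ≠ '>')).length ≤ t.length := List.length_dropWhile_le _ _
          rw [hgd] at h2; simp at h2
          omega
        rw [ih after hlen (noUnclosed_suffix hsuf hpre)]
        -- right-hand side
        rw [breakRecB, if_pos rfl]
        have : (match h : t.dropWhile (· ≠ '>') with
          | [] => ([] : List String)
          | _ :: after => String.ofList ('<' :: t.takeWhile (· ≠ '>') ++ ['>']) :: breakRecB after)
            = String.ofList ('<' :: t.takeWhile (· ≠ '>') ++ ['>']) :: breakRecB after := by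
          split
          · rename_i heq; rw [heq] at hgd; exact absurd hgd (by simp)
          · rename_i g' after' heq
            rw [heq] at hgd
            obtain ⟨-, hA⟩ := List.cons.inj hgd
            rw [hA]
        rw [this]
        simp
      · -- c ≠ '<'
        have hrecb : breakRecB (c :: t) = String.ofList [c] :: breakRecB t := by
          rw [breakRecB, if_neg hc]
        by_cases hg : c = '>'
        · subst hg
          have hdl : ('>' :: t).dropWhile (· ≠ '>') = '>' :: t := by
            rw [List.dropWhile_cons, if_neg (by simp)]
          have htw : ('>' :: t).takeWhile (· ≠ '>') = [] := by
            rw [List.takeWhile_cons, if_neg (by simp)]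
          rw [splitGt_cons_eq _ '>' t hdl, htw]
          obtain ⟨q, qs, hq⟩ := List.exists_cons_of_ne_nil (splitGt_ne_nil t)
          rw [hq]
          rw [show piecesOut ([] :: q :: qs) = pieceOut [] ++ piecesOut (q :: qs) from rfl]
          have hpiece : pieceOut [] = [String.ofList ['>']] := by
            rw [pieceOut_nofind [] (by simp)]
            simp
          rw [hpiece, ← hq, ih t (by simp at hf; omega) (noUnclosed_tail hpre), hrecb]
          simp
        · -- plain character
          have hdlc : (c :: t).dropWhile (· ≠ '>') = t.dropWhile (· ≠ '>') := by
            rw [List.dropWhile_cons, if_pos (by simpa using hg)]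
          have htwc : (c :: t).takeWhile (· ≠ '>') = c :: t.takeWhile (· ≠ '>') := by
            rw [List.takeWhile_cons, if_pos (by simpa using hg)]
          match hdt : t.dropWhile (· ≠ '>') with
          | [] =>
            -- no '>' at all: single piece, and Pre_ forbids any '<'
            have htww : t.takeWhile (· ≠ '>') = t := by
              have := List.takeWhile_append_dropWhile (p := (· ≠ '>')) (l := t)
              rw [hdt] at this; simpa using this
            rw [splitGt_nil_eq _ (by rw [hdlc, hdt]), htwc, htww]
            have hnogt : ∀ x ∈ t, x ≠ '>' := by
              intro x hx
              have := List.dropWhile_eq_nil_iff.mp hdt x hx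
              simpa using this
            have hnolt : '<' ∉ t := by
              intro hin
              obtain ⟨i, hi, hig⟩ := List.mem_iff_getElem.mp hin
              obtain ⟨j, hj, hij, hjg⟩ := noUnclosed_getElem hpre (i + 1) (by simp; omega)
                (by simpa using hig)
              have h1 : j - 1 < t.length := by simp at hj; omega
              have h2 : (c :: t)[j]'hj = t[j - 1]'h1 := by
                rw [getElem_congr_idx (show j = (j - 1) + 1 from by omega)]
                simp
              rw [h2] at hjg
              exact hnogt _ (List.getElem_mem h1) hjg
            rw [show piecesOut [c :: t] = if '<' ∈ c :: t then [] else (c :: t).map (fun c => String.ofList [c]) from rfl]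
            rw [if_neg (by simp [hnolt]; exact fun h => hc h.symm)]
            have hbt : breakRecB t = t.map (fun c => String.ofList [c]) := by
              rw [← ih t (by simp at hf; omega) (noUnclosed_tail hpre)]
              rw [splitGt_nil_eq _ hdt, htww]
              rw [show piecesOut [t] = if '<' ∈ t then [] else t.map (fun c => String.ofList [c]) from rfl]
              rw [if_neg hnolt]
            rw [hrecb, hbt]
            simp
          | g :: rest =>
            rw [splitGt_cons_eq _ g rest (by rw [hdlc, hdt]), htwc]
            obtain ⟨q, qs, hq⟩ := List.exists_cons_of_ne_nil (splitGt_ne_nil rest)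
            rw [hq]
            rw [show piecesOut ((c :: t.takeWhile (· ≠ '>')) :: q :: qs)
                = pieceOut (c :: t.takeWhile (· ≠ '>')) ++ piecesOut (q :: qs) from rfl]
            rw [pieceOut_cons _ hc]
            have hihres := ih t (by simp at hf; omega) (noUnclosed_tail hpre)
            rw [splitGt_cons_eq t g rest hdt, hq] at hihres
            rw [show piecesOut (t.takeWhile (· ≠ '>') :: q :: qs)
                = pieceOut (t.takeWhile (· ≠ '>')) ++ piecesOut (q :: qs) from rfl] at hihres
            rw [hrecb, List.cons_append, hihres]

-- ===== VERDICT (by name: the statement is the Claim_ definition above) =====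
theorem break_sequence_spec : Claim_equal_break_sequence := by
  intro inp _ hpre
  unfold Spec_break_sequence break_sequence break_sequence_alt
  have h1 := breakLoop_agree inp.toList hpre inp.toList.length 0 (by omega) (by omega) []
  have h2 := piecesOut_splitGt_eq inp.toList.length inp.toList (by omega) hpre
  simp at h1
  rw [h1, h2]
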